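-- pv_equiv track=rewrite | github.com/solomka385/obezlichivanie | project_for_danniy/get_group.py | name_gr
-- ===== SOURCE A (Python) =====
-- def name_gr(popularity):
--     groups = {1: (100000, 10**10),
--             2: (30000, 100000),
--             3: (10000, 30000),
--             4: (5000, 10000),
--             5: (0, 5000)}
--     for i in range(1, len(groups)+1):
--         lower, upper = groups[i]
--         if lower <= popularity < upper:
--             return i
-- ===== SOURCE B (Python) =====
-- def name_gr(popularity):
--     # Binary search (bisect_right by hand) over the ascending bracket boundaries;
--     # the insertion point determines the group: index i in 1..5 maps to group 6-i,
--     # out-of-range insertion points (popularity < 0 or >= 10**10) give None.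
--     ts = [0, 5000, 10000, 30000, 100000, 10**10]
--     lo, hi = 0, len(ts)
--     while lo < hi:
--         mid = (lo + hi) // 2
--         if ts[mid] <= popularity:
--             lo = mid + 1
--         else:
--             hi = mid
--     if 1 <= lo <= 5:
--         return 6 - lo
--     return None
-- ===== Notes on version B (the rewrite author's own statement) =====
-- stated objective: alternative
-- what changed: Replaced the dict of (lower,upper) brackets scanned linearly by a sorted boundary list searched with a hand-written bisect_right binary search whose insertion point is mapped arithmetically to the group (6-i), None outside 1..5.
import Mathlib
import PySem

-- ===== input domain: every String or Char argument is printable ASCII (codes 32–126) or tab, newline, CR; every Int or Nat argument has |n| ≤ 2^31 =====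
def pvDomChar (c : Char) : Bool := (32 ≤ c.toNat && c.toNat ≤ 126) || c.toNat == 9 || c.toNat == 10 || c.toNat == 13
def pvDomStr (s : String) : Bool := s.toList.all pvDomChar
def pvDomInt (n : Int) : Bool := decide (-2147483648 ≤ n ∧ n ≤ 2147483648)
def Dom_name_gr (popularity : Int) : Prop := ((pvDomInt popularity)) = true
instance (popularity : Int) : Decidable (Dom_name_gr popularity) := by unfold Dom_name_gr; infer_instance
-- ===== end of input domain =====

-- B replaces A's dict-of-brackets linear scan with a hand-written bisect_right binary search over the sorted boundary list, mapping the insertion point arithmetically to a group (alternative algorithm).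


-- ===== PORT A =====
-- The dict {1:(100000,10^10), …, 5:(0,5000)} and the for-loop over range(1, len(groups)+1)
-- with its early return, via an Option accumulator.
def name_gr (popularity : Int) : Option Int :=
  let groups : PySem.Dict Int (Int × Int) :=
    PySem.Dict.ofList [(1, (100000, 10^10)), (2, (30000, 100000)),
                       (3, (10000, 30000)), (4, (5000, 10000)), (5, (0, 5000))]
  (PySem.List.pyRange 1 ((groups.items.length : Int) + 1) 1).foldl
    (fun acc i =>
      match acc with
      | some r => some r
      | none =>
        match groups.get? i with
        | some (lower, upper) => if lower ≤ popularity ∧ popularity < upper then some i else none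
        | none => none)  -- unreachable: every i in range(1,6) is a key
    none

-- ===== PORT B =====
-- The 'while lo < hi' loop of Source B; the Nat fuel argument only makes the loop total
-- (it starts at len(ts), more than the loop's iteration count) and never fires before lo = hi.
def bisectLoop (ts : List Int) (p : Int) : Nat → Int → Int → Int
  | 0, lo, _ => lo
  | fuel+1, lo, hi =>
    if lo < hi then
      let mid := PySem.Int.floordiv (lo + hi) 2
      match PySem.List.pyGet? ts mid with
      | some v => if v ≤ p then bisectLoop ts p fuel (mid + 1) hi else bisectLoop ts p fuel lo mid
      | none => lo  -- unreachable: mid is always in range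
    else lo

def name_gr_alt (popularity : Int) : Option Int :=
  let ts : List Int := [0, 5000, 10000, 30000, 100000, 10^10]
  let lo := bisectLoop ts popularity ts.length 0 (ts.length : Int)
  if 1 ≤ lo ∧ lo ≤ 5 then some (6 - lo) else none

-- ===== PRECONDITION & SPEC =====
def Spec_name_gr (popularity : Int) (out : Option Int) : Prop := out = name_gr_alt popularity
instance (popularity : Int) (out : Option Int) : Decidable (Spec_name_gr popularity out) := by unfold Spec_name_gr; infer_instance

-- ===== CLAIM (what is proved, stated in full; the proofs are below) =====
def Claim_equal_name_gr : Prop := ∀ (popularity : Int), Dom_name_gr popularity → Spec_name_gr popularity (name_gr popularity)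

-- ===== LEMMAS AND PROOFS =====

-- one iteration of the while-loop, taken branch lower ≤ p
theorem bisect_step_le (ts : List Int) (p : Int) (fuel : Nat) (lo hi mid v : Int)
    (h : lo < hi) (hm : PySem.Int.floordiv (lo + hi) 2 = mid)
    (hg : PySem.List.pyGet? ts mid = some v) (hv : v ≤ p) :
    bisectLoop ts p (fuel + 1) lo hi = bisectLoop ts p fuel (mid + 1) hi := by
  simp only [bisectLoop, hm, hg, h, hv, if_true]

-- one iteration of the while-loop, taken branch p < lower
theorem bisect_step_gt (ts : List Int) (p : Int) (fuel : Nat) (lo hi mid v : Int)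
    (h : lo < hi) (hm : PySem.Int.floordiv (lo + hi) 2 = mid)
    (hg : PySem.List.pyGet? ts mid = some v) (hv : ¬ v ≤ p) :
    bisectLoop ts p (fuel + 1) lo hi = bisectLoop ts p fuel lo mid := by
  simp only [bisectLoop, hm, hg, h, hv, if_true, if_false]

-- loop exit when lo = hi
theorem bisect_done (ts : List Int) (p : Int) (fuel : Nat) (lo hi : Int)
    (h : ¬ lo < hi) : bisectLoop ts p (fuel + 1) lo hi = lo := by
  simp [bisectLoop, h]

-- the binary search computes the insertion point of p in the boundary list
theorem loop_eval (p : Int) : bisectLoop [0, 5000, 10000, 30000, 100000, 10000000000] p 6 0 6 =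
    (if p < 0 then 0 else if p < 5000 then 1 else if p < 10000 then 2
     else if p < 30000 then 3 else if p < 100000 then 4
     else if p < 10000000000 then 5 else 6) := by
  by_cases h3 : (30000 : Int) ≤ p
  · rw [bisect_step_le _ p 5 0 6 3 30000 (by decide) (by decide) (by decide) h3]
    rw [show ((3:Int)+1) = 4 from rfl]
    by_cases h4 : (10000000000 : Int) ≤ p
    · rw [bisect_step_le _ p 4 4 6 5 10000000000 (by decide) (by decide) (by decide) h4,
        show ((5:Int)+1) = 6 from rfl, bisect_done _ p 3 6 6 (by decide)]
      split_ifs <;> omega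
    · rw [bisect_step_gt _ p 4 4 6 5 10000000000 (by decide) (by decide) (by decide) h4]
      by_cases h5 : (100000 : Int) ≤ p
      · rw [bisect_step_le _ p 3 4 5 4 100000 (by decide) (by decide) (by decide) h5,
          show ((4:Int)+1) = 5 from rfl, bisect_done _ p 2 5 5 (by decide)]
        split_ifs <;> omega
      · rw [bisect_step_gt _ p 3 4 5 4 100000 (by decide) (by decide) (by decide) h5,
          bisect_done _ p 2 4 4 (by decide)]
        split_ifs <;> omega
  · rw [bisect_step_gt _ p 5 0 6 3 30000 (by decide) (by decide) (by decide) h3]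
    by_cases h1 : (5000 : Int) ≤ p
    · rw [bisect_step_le _ p 4 0 3 1 5000 (by decide) (by decide) (by decide) h1]
      rw [show ((1:Int)+1) = 2 from rfl]
      by_cases h2 : (10000 : Int) ≤ p
      · rw [bisect_step_le _ p 3 2 3 2 10000 (by decide) (by decide) (by decide) h2,
          show ((2:Int)+1) = 3 from rfl, bisect_done _ p 2 3 3 (by decide)]
        split_ifs <;> omega
      · rw [bisect_step_gt _ p 3 2 3 2 10000 (by decide) (by decide) (by decide) h2,
          bisect_done _ p 2 2 2 (by decide)]
        split_ifs <;> omega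
    · rw [bisect_step_gt _ p 4 0 3 1 5000 (by decide) (by decide) (by decide) h1]
      by_cases h0 : (0 : Int) ≤ p
      · rw [bisect_step_le _ p 3 0 1 0 0 (by decide) (by decide) (by decide) h0,
          show ((0:Int)+1) = 1 from rfl, bisect_done _ p 2 1 1 (by decide)]
        split_ifs <;> omega
      · rw [bisect_step_gt _ p 3 0 1 0 0 (by decide) (by decide) (by decide) h0,
          bisect_done _ p 2 0 0 (by decide)]
        split_ifs <;> omega

-- B, evaluated: the insertion point mapped through 6 - lo
theorem alt_eval (p : Int) : name_gr_alt p =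
    if p < 0 then none else if p < 5000 then some 5 else if p < 10000 then some 4
    else if p < 30000 then some 3 else if p < 100000 then some 2
    else if p < 10000000000 then some 1 else none := by
  unfold name_gr_alt
  norm_num
  rw [loop_eval p]
  split_ifs <;> first | rfl | omega

-- ===== VERDICT (by name: the statement is the Claim_ definition above) =====
theorem name_gr_spec : Claim_equal_name_gr := by
  intro p _
  unfold Spec_name_gr name_gr
  rw [alt_eval]
  norm_num [PySem.Dict.ofList, PySem.Dict.update, PySem.Dict.empty, PySem.Dict.insert,
    PySem.Dict.items, PySem.Dict.get?, PySem.List.pyRange, List.foldl]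
  rw [(by decide : List.range (Int.toNat 5) = [0, 1, 2, 3, 4])]
  simp only [List.map_cons, List.map_nil, List.foldl_cons, List.foldl_nil, List.find?]
  norm_num
  split_ifs <;> (try simp) <;> (try split_ifs) <;> first | rfl | omega
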